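-- pv_equiv track=rewrite | github.com/whbarndt/wrapplotlib | src/wrapplotlib.py | get_updated_dict
-- ===== SOURCE A (Python) =====
-- import copy
--
-- def get_updated_dict(given_dict, set_dict):
--     set_key_list = list(set_dict.keys())
--     given_key_list = list(given_dict.keys())
--     new_dict = copy.deepcopy(set_dict)
--     for i in set_key_list:
--         for j in given_key_list:
--             if i == j:
--                 new_dict[i] = given_dict[j]
--     return new_dict
-- ===== SOURCE B (Python) =====
-- import copy
--
-- def get_updated_dict(given_dict, set_dict):
--     # One pass over set_dict: take given_dict's value where the key matches,
--     # deep-copy the kept set_dict value otherwise.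
--     return {k: given_dict[k] if k in given_dict else copy.deepcopy(v)
--             for k, v in set_dict.items()}
-- ===== Notes on version B (the rewrite author's own statement) =====
-- stated objective: simpler
-- what changed: Replaces deepcopy-everything plus a nested loop over both key lists with a single dict comprehension over set_dict doing one hash lookup per key (O(n*m) scans become O(n) lookups, though the harness could not time it here).
import Mathlib
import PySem

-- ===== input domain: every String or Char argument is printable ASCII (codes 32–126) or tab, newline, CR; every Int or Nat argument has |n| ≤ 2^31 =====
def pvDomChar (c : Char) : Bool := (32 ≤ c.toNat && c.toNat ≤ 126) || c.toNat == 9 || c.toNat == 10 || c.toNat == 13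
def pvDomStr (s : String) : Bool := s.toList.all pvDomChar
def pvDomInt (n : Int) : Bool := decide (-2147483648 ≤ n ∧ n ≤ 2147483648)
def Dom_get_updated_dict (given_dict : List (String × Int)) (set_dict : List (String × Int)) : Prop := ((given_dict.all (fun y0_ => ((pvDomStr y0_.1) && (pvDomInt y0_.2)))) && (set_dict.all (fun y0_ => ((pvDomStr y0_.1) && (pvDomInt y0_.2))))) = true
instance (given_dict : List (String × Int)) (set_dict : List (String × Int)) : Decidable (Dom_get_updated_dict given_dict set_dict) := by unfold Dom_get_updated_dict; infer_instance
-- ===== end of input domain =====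

-- B is one pass over set_dict with a direct lookup in given_dict instead of
-- deepcopy-all followed by a nested loop over both key lists; return-value
-- equivalence only (Python A/B differ in which values are deep copies).

-- ===== PORT A =====
-- new_dict[i] = given_dict[j]: only executed with i == j ∈ given keys, so the
-- lookup always succeeds; ported as get? with a .getD 0 that is never reached.
def get_updated_dict (given_dict : List (String × Int)) (set_dict : List (String × Int)) : List (String × Int) :=
  let gd := PySem.Dict.ofList given_dict
  let sd := PySem.Dict.ofList set_dict
  let set_key_list := sd.keys
  let given_key_list := gd.keys
  let new_dict := sd  -- copy.deepcopy(set_dict): value-equal copy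
  (set_key_list.foldl (fun nd i =>
    given_key_list.foldl (fun nd j =>
      if i == j then nd.insert i ((gd.get? j).getD 0) else nd) nd) new_dict).items

-- ===== PORT B =====
def get_updated_dict_alt (given_dict : List (String × Int)) (set_dict : List (String × Int)) : List (String × Int) :=
  let gd := PySem.Dict.ofList given_dict
  ((PySem.Dict.ofList set_dict).items.foldl (fun nd p =>
    nd.insert p.1 (match gd.get? p.1 with | some x => x | none => p.2))
    PySem.Dict.empty).items

-- ===== PRECONDITION & SPEC =====
def Spec_get_updated_dict (given_dict : List (String × Int)) (set_dict : List (String × Int)) (out : List (String × Int)) : Prop := out = get_updated_dict_alt given_dict set_dict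
instance (given_dict : List (String × Int)) (set_dict : List (String × Int)) (out : List (String × Int)) : Decidable (Spec_get_updated_dict given_dict set_dict out) := by unfold Spec_get_updated_dict; infer_instance

-- ===== CLAIM (what is proved, stated in full; the proofs are below) =====
def Claim_equal_get_updated_dict : Prop := ∀ (given_dict : List (String × Int)) (set_dict : List (String × Int)), Dom_get_updated_dict given_dict set_dict → Spec_get_updated_dict given_dict set_dict (get_updated_dict given_dict set_dict)

-- ===== LEMMAS AND PROOFS =====

-- inner loop of A: scanning given keys and inserting on a match is one conditional insert
theorem inner_loop_eq (gd : PySem.Dict String Int) (l : List String) (i : String)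
    (nd : PySem.Dict String Int) :
    l.foldl (fun nd j => if i == j then nd.insert i ((gd.get? j).getD 0) else nd) nd
      = if i ∈ l then nd.insert i ((gd.get? i).getD 0) else nd := by
  induction l generalizing nd with
  | nil => simp
  | cons j l ih =>
      simp only [List.foldl_cons, List.mem_cons]
      by_cases h : i = j
      · subst h
        simp only [beq_self_eq_true, if_pos, ih]
        by_cases hm : i ∈ l
        · simp [hm, PySem.Dict.insert_insert_self]
        · simp [hm]
      · simp only [beq_eq_false_iff_ne.mpr h, Bool.false_eq_true, ih]
        simp [h]

-- outer loop of A over a key list, as a map over the items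
theorem outer_loop_items (gd : PySem.Dict String Int) (ks : List String)
    (nd : PySem.Dict String Int) (hnd : nd.keys.Nodup)
    (hsub : ∀ i ∈ ks, nd.contains i = true) :
    (ks.foldl (fun nd i => if gd.contains i then nd.insert i ((gd.get? i).getD 0) else nd) nd).items
      = nd.items.map (fun p => if p.1 ∈ ks ∧ gd.contains p.1 then (p.1, (gd.get? p.1).getD 0) else p) := by
  induction ks generalizing nd with
  | nil => simp
  | cons i ks ih =>
      simp only [List.foldl_cons]
      by_cases hg : gd.contains i = true
      · rw [if_pos hg]
        have hc : nd.contains i = true := hsub i (List.mem_cons_self)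
        have hkeys : (nd.insert i ((gd.get? i).getD 0)).keys = nd.keys :=
          PySem.Dict.keys_insert_of_contains _ _ hc
        have hsub' : ∀ j ∈ ks, (nd.insert i ((gd.get? i).getD 0)).contains j = true := by
          intro j hj
          rw [PySem.Dict.contains_insert]
          simp [hsub j (List.mem_cons_of_mem _ hj)]
        rw [ih _ (hkeys ▸ hnd) hsub', PySem.Dict.items_insert_of_contains _ _ hc,
            List.map_map]
        apply List.map_congr_left
        intro p hp
        simp only [Function.comp]
        by_cases hpi : p.1 = i
        · by_cases hm : i ∈ ks <;> simp [hpi, hg, hm]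
        · have : (p.1 == i) = false := beq_eq_false_iff_ne.mpr hpi
          simp only [this, Bool.false_eq_true]
          simp [List.mem_cons, hpi]
      · rw [if_neg hg]
        rw [ih _ hnd (fun j hj => hsub j (List.mem_cons_of_mem _ hj))]
        apply List.map_congr_left
        intro p hp
        by_cases hpi : p.1 = i <;> simp [hpi, hg, List.mem_cons]

theorem get_updated_dict_spec : Claim_equal_get_updated_dict := by
  intro given_dict set_dict _
  unfold Spec_get_updated_dict get_updated_dict get_updated_dict_alt
  set gd := PySem.Dict.ofList given_dict with hgd
  set sd := PySem.Dict.ofList set_dict with hsd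
  have hnds : sd.keys.Nodup := PySem.Dict.nodup_keys_ofList _
  -- A side: collapse inner loop, then outer loop
  have hA : (sd.keys.foldl (fun nd i =>
        gd.keys.foldl (fun nd j => if i == j then nd.insert i ((gd.get? j).getD 0) else nd) nd) sd).items
      = sd.items.map (fun p => if p.1 ∈ sd.keys ∧ gd.contains p.1 then (p.1, (gd.get? p.1).getD 0) else p) := by
    have hbody : ∀ (nd : PySem.Dict String Int) (i : String),
        gd.keys.foldl (fun nd j => if i == j then nd.insert i ((gd.get? j).getD 0) else nd) nd
          = if gd.contains i then nd.insert i ((gd.get? i).getD 0) else nd := by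
      intro nd i
      rw [inner_loop_eq]
      by_cases hm : i ∈ gd.keys
      · rw [if_pos hm, if_pos ((PySem.Dict.contains_iff_mem_keys _ _).mpr hm)]
      · rw [if_neg hm, if_neg (by simpa [PySem.Dict.contains_iff_mem_keys] using hm)]
    calc (sd.keys.foldl (fun nd i =>
            gd.keys.foldl (fun nd j => if i == j then nd.insert i ((gd.get? j).getD 0) else nd) nd) sd).items
        = (sd.keys.foldl (fun nd i => if gd.contains i then nd.insert i ((gd.get? i).getD 0) else nd) sd).items := by
          congr 1
          exact List.foldl_ext _ _ _ (fun nd i _ => hbody nd i)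
      _ = _ := outer_loop_items gd sd.keys sd hnds
            (fun i hi => (PySem.Dict.contains_iff_mem_keys _ _).mpr hi)
  -- B side: fresh distinct inserts append
  have hB : (sd.items.foldl (fun nd p =>
        nd.insert p.1 (match gd.get? p.1 with | some x => x | none => p.2)) PySem.Dict.empty).items
      = sd.items.map (fun p => (p.1, match gd.get? p.1 with | some x => x | none => p.2)) := by
    rw [PySem.Dict.items_foldl_insert_fresh _ _ _ _ (fun p _ => PySem.Dict.contains_empty _) hnds]
    rfl
  rw [hA, hB]
  apply List.map_congr_left
  intro p hp
  have hpk : p.1 ∈ sd.keys := PySem.Dict.mem_keys_of_mem_items _ hp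
  cases hq : gd.get? p.1 with
  | none =>
      have : gd.contains p.1 = false := by
        rw [PySem.Dict.contains_eq_isSome_get?, hq]; rfl
      simp [this]
  | some x =>
      have : gd.contains p.1 = true := by
        rw [PySem.Dict.contains_eq_isSome_get?, hq]; rfl
      simp [this, hpk]
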